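-- pv_equiv track=rewrite | github.com/zhaihuayun/zhaihuayun | mcs_gch_hardware_driver/build/packet_create.py | gen_padding_line_rec
-- ===== SOURCE A (Python) =====
-- def gen_padding_line_rec(addr, length, pad_bit):
--     checksum = 0
--     data = ''
--     data += ":%02x".upper() % length
--     checksum += length & 0xff
--     checksum += (addr & 0xff)
--     checksum += ((addr >> 8) & 0xff)
--     data += "%04x00".upper() % addr
--     pad_val = 0xFF if pad_bit == '1' else 0
--     for _i in range(length):
--         data += "%02x".upper() % pad_val
--         checksum += pad_val
--     checksum = (0x100 - (checksum & 0xFF)) & 0xFF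
--     data += "%02x\n".upper() % (checksum)
--     return data
-- ===== SOURCE B (Python) =====
-- def gen_padding_line_rec(addr, length, pad_bit):
--     n = max(length, 0)
--     pad_val = 0xFF if pad_bit == '1' else 0
--     checksum = (-(length + addr + (addr >> 8) + pad_val * n)) & 0xFF
--     return ":" + "%02X" % length + "%04X00" % addr + ("%02X" % pad_val) * n + "%02X\n" % checksum
-- ===== Notes on version B (the rewrite author's own statement) =====
-- stated objective: faster
-- what changed: The per-byte padding for-loop is removed: the padding hex is produced by one string repetition and its checksum contribution by the closed form pad_val * max(length, 0), and the checksum is folded into a single masked negation instead of field-by-field masking and accumulation.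
import Mathlib
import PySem

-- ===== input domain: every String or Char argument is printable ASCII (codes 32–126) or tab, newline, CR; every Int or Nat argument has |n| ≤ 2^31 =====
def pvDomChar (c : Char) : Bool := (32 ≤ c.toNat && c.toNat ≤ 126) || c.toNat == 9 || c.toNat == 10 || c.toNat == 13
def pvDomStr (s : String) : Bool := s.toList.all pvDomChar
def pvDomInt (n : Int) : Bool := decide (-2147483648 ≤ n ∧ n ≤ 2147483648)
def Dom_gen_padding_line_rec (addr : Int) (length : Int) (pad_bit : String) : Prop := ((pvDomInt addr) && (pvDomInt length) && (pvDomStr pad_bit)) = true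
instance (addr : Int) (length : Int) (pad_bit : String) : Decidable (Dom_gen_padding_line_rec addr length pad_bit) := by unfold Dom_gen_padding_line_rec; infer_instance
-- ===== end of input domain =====

-- B drops the padding for-loop: the padding hex is one string repetition and its
-- checksum contribution is the closed form pad_val * max(length, 0) (objective: faster, constant-factor: one string repetition and closed-form checksum instead of the per-byte loop, measured).

-- shared helper: Python's '%0NX' % v (uppercase hex, zero-padded to width, sign in front)
def hexCharU (d : Nat) : Char := if d < 10 then Char.ofNat (48 + d) else Char.ofNat (55 + d)

def hexNatU (n : Nat) : List Char :=
  if _h : n < 16 then [hexCharU n]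
  else hexNatU (n / 16) ++ [hexCharU (n % 16)]
decreasing_by exact Nat.div_lt_self (by omega) (by omega)

def fmtHexU (width : Nat) (v : Int) : String :=
  PySem.Str.zfill (String.ofList ((if v < 0 then ['-'] else []) ++ hexNatU v.natAbs)) width

-- ===== PORT A =====
def gen_padding_line_rec (addr : Int) (length : Int) (pad_bit : String) : String :=
  let checksum : Int := 0
  let data : String := ""
  let data := data ++ ":" ++ fmtHexU 2 length                 -- ":%02X" % length
  let checksum := checksum + PySem.Int.band length 255
  let checksum := checksum + PySem.Int.band addr 255
  -- addr >> 8 is Python's arithmetic shift = floor division by 256 (exact on all Ints)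
  let checksum := checksum + PySem.Int.band (PySem.Int.floordiv addr 256) 255
  let data := data ++ fmtHexU 4 addr ++ "00"                  -- "%04X00" % addr
  let pad_val : Int := if pad_bit = "1" then 255 else 0
  let st := (PySem.List.pyRange 0 length).foldl
      (fun (st : String × Int) _ => (st.1 ++ fmtHexU 2 pad_val, st.2 + pad_val))
      (data, checksum)
  let checksum := PySem.Int.band (256 - PySem.Int.band st.2 255) 255
  st.1 ++ fmtHexU 2 checksum ++ "\n"

-- ===== PORT B =====
def gen_padding_line_rec_alt (addr : Int) (length : Int) (pad_bit : String) : String :=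
  let n : Int := max length 0
  let pad_val : Int := if pad_bit = "1" then 255 else 0
  -- addr >> 8 is Python's arithmetic shift = floor division by 256 (exact on all Ints)
  let checksum : Int :=
    PySem.Int.band (-(length + addr + PySem.Int.floordiv addr 256 + pad_val * n)) 255
  ":" ++ fmtHexU 2 length ++ fmtHexU 4 addr ++ "00"
    ++ String.ofList (PySem.List.pyRepeat (fmtHexU 2 pad_val).toList n)
    ++ fmtHexU 2 checksum ++ "\n"

-- ===== PRECONDITION & SPEC =====
def Spec_gen_padding_line_rec (addr : Int) (length : Int) (pad_bit : String) (out : String) : Prop := out = gen_padding_line_rec_alt addr length pad_bit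
instance (addr : Int) (length : Int) (pad_bit : String) (out : String) : Decidable (Spec_gen_padding_line_rec addr length pad_bit out) := by unfold Spec_gen_padding_line_rec; infer_instance

-- ===== CLAIM (what is proved, stated in full; the proofs are below) =====
def Claim_equal_gen_padding_line_rec : Prop := ∀ (addr : Int) (length : Int) (pad_bit : String), Dom_gen_padding_line_rec addr length pad_bit → Spec_gen_padding_line_rec addr length pad_bit (gen_padding_line_rec addr length pad_bit)

-- ===== LEMMAS AND PROOFS =====

-- a & 0xFF in Python is the (floor) remainder mod 256
theorem band_255_eq_emod (a : Int) : PySem.Int.band a 255 = a % 256 := by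
  unfold PySem.Int.band
  by_cases h : 0 ≤ a
  · rw [if_pos h, if_pos (by norm_num)]
    have hn : a.toNat &&& (255 : Int).toNat = a.toNat % 256 := by
      simpa using Nat.and_two_pow_sub_one_eq_mod a.toNat 8
    rw [hn]
    omega
  · rw [if_neg (by omega), if_pos (by norm_num)]
    have hn : (255 : Int).toNat &&& (-a - 1).toNat = (-a - 1).toNat % 256 := by
      rw [Nat.and_comm]
      simpa using Nat.and_two_pow_sub_one_eq_mod (-a - 1).toNat 8
    rw [hn]
    omega

-- the padding loop appends one fixed block and adds one fixed amount per iteration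
theorem pad_loop_eq {α : Type} (L : List α) (s : String) (p : Int) (d : String) (c : Int) :
    L.foldl (fun (st : String × Int) _ => (st.1 ++ s, st.2 + p)) (d, c)
      = (d ++ String.ofList (List.replicate L.length s.toList).flatten, c + p * L.length) := by
  induction L generalizing d c with
  | nil => simp
  | cons x t ih =>
      rw [List.foldl_cons, ih, Prod.mk.injEq]
      refine ⟨?_, ?_⟩
      · show d ++ s ++ String.ofList (List.replicate t.length s.toList).flatten
            = d ++ String.ofList (List.replicate (x :: t).length s.toList).flatten
        rw [List.length_cons, List.replicate_succ, List.flatten_cons, String.ofList_append,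
          ← String.append_assoc]
        congr 1
        rw [String.ofList_toList]
      · show c + p + p * t.length = c + p * (t.length + 1 : Nat)
        push_cast
        ring

theorem gen_padding_line_rec_eq (addr : Int) (length : Int) (pad_bit : String) :
    gen_padding_line_rec addr length pad_bit = gen_padding_line_rec_alt addr length pad_bit := by
  unfold gen_padding_line_rec gen_padding_line_rec_alt
  simp only []
  rw [pad_loop_eq]
  have hlen : (PySem.List.pyRange 0 length).length = length.toNat := by
    simpa using PySem.List.length_pyRange_one 0 length
  rw [hlen]
  have hrep : PySem.List.pyRepeat (fmtHexU 2 (if pad_bit = "1" then (255 : Int) else 0)).toList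
      (max length 0) = (List.replicate length.toNat
        (fmtHexU 2 (if pad_bit = "1" then (255 : Int) else 0)).toList).flatten := by
    unfold PySem.List.pyRepeat
    have h : (max length 0).toNat = length.toNat := by omega
    rw [h]
  have hsum : PySem.Int.band (256 - PySem.Int.band
        (0 + PySem.Int.band length 255 + PySem.Int.band addr 255
          + PySem.Int.band (PySem.Int.floordiv addr 256) 255
          + (if pad_bit = "1" then (255 : Int) else 0) * (length.toNat : Int)) 255) 255
      = PySem.Int.band (-(length + addr + PySem.Int.floordiv addr 256
          + (if pad_bit = "1" then (255 : Int) else 0) * max length 0)) 255 := by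
    have hm : ((length.toNat : Int)) = max length 0 := by omega
    rw [hm]
    simp only [band_255_eq_emod]
    by_cases h : 0 ≤ length
    · have : max length 0 = length := by omega
      rw [this]
      split_ifs <;> omega
    · have : max length 0 = 0 := by omega
      rw [this]
      split_ifs <;> omega
  rw [hsum, hrep]
  simp [String.append_assoc]

-- ===== VERDICT (by name: the statement is the Claim_ definition above) =====
theorem gen_padding_line_rec_spec : Claim_equal_gen_padding_line_rec := by
  intro addr length pad_bit _
  unfold Spec_gen_padding_line_rec
  exact gen_padding_line_rec_eq addr length pad_bit
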